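-- pv_equiv track=rewrite | github.com/gupta-soham/pulseproof | agents/shared/enhanced_event_processor.py | _merge_risk_factors
-- ===== SOURCE A (Python) =====
-- from typing import Dict, Any, List, Optional
--
-- def _merge_risk_factors(basic_factors: List[str], enhanced_factors: List[str]) -> List[str]:
--     """
--     Merge basic and enhanced risk factors, removing duplicates
--     """
--     all_factors = list(set(basic_factors + enhanced_factors))
--
--     # Sort factors by priority
--     priority_order = [
--         "CRITICAL_FINANCIAL_IMPACT",
--         "HIGH_FINANCIAL_IMPACT",
--         "UNLIMITED_APPROVAL",
--         "BEHAVIORAL_ANOMALY",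
--         "REPUTATION_RISK",
--         "HIGH_ANOMALY_SCORE",
--         "MEDIUM_FINANCIAL_IMPACT",
--         "LARGE_APPROVAL",
--         "MEDIUM_ANOMALY_SCORE",
--         "LOW_FINANCIAL_IMPACT",
--         "LOW_ANOMALY_SCORE"
--     ]
--
--     # Sort factors by priority
--     sorted_factors = []
--     for priority_factor in priority_order:
--         if priority_factor in all_factors:
--             sorted_factors.append(priority_factor)
--             all_factors.remove(priority_factor)
--
--     # Add remaining factors
--     sorted_factors.extend(sorted(all_factors))
--
--     return sorted_factors
-- ===== SOURCE B (Python) =====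
-- from typing import List
--
-- _PRIORITY_ORDER = [
--     "CRITICAL_FINANCIAL_IMPACT",
--     "HIGH_FINANCIAL_IMPACT",
--     "UNLIMITED_APPROVAL",
--     "BEHAVIORAL_ANOMALY",
--     "REPUTATION_RISK",
--     "HIGH_ANOMALY_SCORE",
--     "MEDIUM_FINANCIAL_IMPACT",
--     "LARGE_APPROVAL",
--     "MEDIUM_ANOMALY_SCORE",
--     "LOW_FINANCIAL_IMPACT",
--     "LOW_ANOMALY_SCORE",
-- ]
--
-- _RANK = {f: i for i, f in enumerate(_PRIORITY_ORDER)}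
--
--
-- def _merge_risk_factors(basic_factors: List[str], enhanced_factors: List[str]) -> List[str]:
--     """Dedup and order risk factors: known priority factors first (in priority
--     order), then the rest alphabetically — as a single keyed sort."""
--     return sorted(set(basic_factors + enhanced_factors),
--                   key=lambda f: (_RANK.get(f, len(_PRIORITY_ORDER)), f))
-- ===== Notes on version B (the rewrite author's own statement) =====
-- stated objective: idiomatic
-- what changed: Replaces the explicit scan-over-the-priority-list with membership test and list.remove plus a second alphabetical sort by a precomputed rank dictionary and one single keyed sort: sorted(set(basic+enhanced), key=lambda f: (rank.get(f, len(priority_order)), f)).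
import Mathlib
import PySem

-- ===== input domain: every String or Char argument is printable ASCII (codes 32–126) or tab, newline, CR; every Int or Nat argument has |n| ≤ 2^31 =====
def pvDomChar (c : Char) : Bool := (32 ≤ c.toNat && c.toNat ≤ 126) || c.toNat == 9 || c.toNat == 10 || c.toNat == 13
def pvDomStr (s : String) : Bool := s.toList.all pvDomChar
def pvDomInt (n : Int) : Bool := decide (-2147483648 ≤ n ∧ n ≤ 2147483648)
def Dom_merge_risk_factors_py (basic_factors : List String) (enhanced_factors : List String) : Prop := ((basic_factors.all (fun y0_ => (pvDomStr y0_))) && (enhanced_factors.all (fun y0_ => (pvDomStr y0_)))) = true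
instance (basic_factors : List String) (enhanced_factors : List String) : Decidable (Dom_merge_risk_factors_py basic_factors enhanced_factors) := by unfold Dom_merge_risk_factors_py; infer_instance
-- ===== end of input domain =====

-- B replaces A's scan-over-the-priority-list with remove plus a separate alphabetical sort
-- by one keyed sort over a precomputed rank dictionary (idiomatic; same result, proved equal).

-- the priority table both sources carry as a literal
def pvPriorityOrder : List String :=
  ["CRITICAL_FINANCIAL_IMPACT",
   "HIGH_FINANCIAL_IMPACT",
   "UNLIMITED_APPROVAL",
   "BEHAVIORAL_ANOMALY",
   "REPUTATION_RISK",
   "HIGH_ANOMALY_SCORE",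
   "MEDIUM_FINANCIAL_IMPACT",
   "LARGE_APPROVAL",
   "MEDIUM_ANOMALY_SCORE",
   "LOW_FINANCIAL_IMPACT",
   "LOW_ANOMALY_SCORE"]

-- ===== PORT A =====
-- list(set(basic+enhanced)); for p in priority_order: if p in all: append p; all.remove(p); then extend(sorted(all))
def merge_risk_factors_py (basic_factors : List String) (enhanced_factors : List String) : List String :=
  let all_factors : List String := PySem.Set.ofList (basic_factors ++ enhanced_factors)
  let res := pvPriorityOrder.foldl
    (fun st p =>
      if st.2.contains p then (st.1 ++ [p], (PySem.List.remove? st.2 p).getD st.2) else st)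
    (([] : List String), all_factors)
  res.1 ++ PySem.List.sorted res.2 (fun x => x) false

-- ===== PORT B =====
-- rank = {f: i for i, f in enumerate(priority_order)}
def pvRankDict : PySem.Dict String Int :=
  PySem.Dict.ofList ((PySem.List.enumerate pvPriorityOrder).map (fun iv => (iv.2, iv.1)))

-- sorted(set(basic+enhanced), key=lambda f: (rank.get(f, len(priority_order)), f))
def merge_risk_factors_py_alt (basic_factors : List String) (enhanced_factors : List String) : List String :=
  PySem.List.sorted2 (PySem.Set.ofList (basic_factors ++ enhanced_factors))
    (fun f => pvRankDict.getD f (pvPriorityOrder.length : Int)) (fun f => f) false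

-- ===== PRECONDITION & SPEC =====
def Spec_merge_risk_factors_py (basic_factors : List String) (enhanced_factors : List String) (out : List String) : Prop := out = merge_risk_factors_py_alt basic_factors enhanced_factors
instance (basic_factors : List String) (enhanced_factors : List String) (out : List String) : Decidable (Spec_merge_risk_factors_py basic_factors enhanced_factors out) := by unfold Spec_merge_risk_factors_py; infer_instance

-- ===== CLAIM (what is proved, stated in full; the proofs are below) =====
def Claim_equal_merge_risk_factors_py : Prop := ∀ (basic_factors : List String) (enhanced_factors : List String), Dom_merge_risk_factors_py basic_factors enhanced_factors → Spec_merge_risk_factors_py basic_factors enhanced_factors (merge_risk_factors_py basic_factors enhanced_factors)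

-- ===== LEMMAS AND PROOFS =====

-- the sort key B uses, seen as one lexicographic key
def pvRk (f : String) : Int := pvRankDict.getD f (pvPriorityOrder.length : Int)
def pvKey (f : String) : Lex (Int × String) := toLex (pvRk f, f)

-- sorted2 with keys k1, k2 is sorted with the lexicographic key (k1, k2)
lemma pvSorted2_eq_sorted (xs : List String) (k1 : String → Int) (k2 : String → String) :
    PySem.List.sorted2 xs k1 k2 false
      = PySem.List.sorted xs (fun a => toLex (k1 a, k2 a)) false := by
  have hb : (fun (a b : String) => decide (k1 a < k1 b) || (!decide (k1 b < k1 a) && decide (k2 a < k2 b)))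
      = (fun (a b : String) => decide (toLex (k1 a, k2 a) < toLex (k1 b, k2 b))) := by
    funext a b
    rcases lt_trichotomy (k1 a) (k1 b) with h | h | h
    · simp [h, Prod.Lex.lt_iff]
    · simp [h, Prod.Lex.lt_iff]
    · simp only [Prod.Lex.lt_iff]
      have hnlt : ¬ k1 a < k1 b := asymm h
      have hne : k1 a ≠ k1 b := ne_of_gt h
      simp [hnlt, h, hne]
  unfold PySem.List.sorted2 PySem.List.sorted
  simp only [Bool.false_eq_true, if_false, hb]

-- invariant of A's priority loop
lemma pvFoldA (Q : List String) (sf af : List String) (hQ : Q.Nodup) (haf : af.Nodup) :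
    Q.foldl
      (fun st p =>
        if st.2.contains p then (st.1 ++ [p], (PySem.List.remove? st.2 p).getD st.2) else st)
      (sf, af)
    = (sf ++ Q.filter (fun p => decide (p ∈ af)), af.filter (fun x => decide (x ∉ Q))) := by
  induction Q generalizing sf af with
  | nil => simp
  | cons p Q ih =>
    rcases List.nodup_cons.mp hQ with ⟨hpQ, hQ'⟩
    by_cases hp : p ∈ af
    · have hc : af.contains p = true := by simpa [List.contains_iff_mem] using hp
      have hrm : PySem.List.remove? af p = some (af.erase p) :=
        PySem.List.remove?_eq_some_erase af p hp
      simp only [List.foldl_cons, hc, if_true, hrm, Option.getD_some]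
      rw [ih (sf ++ [p]) (af.erase p) hQ' (haf.erase p)]
      simp only [Prod.mk.injEq]
      constructor
      · -- first component
        rw [List.filter_cons]
        simp only [hp, decide_true, if_true]
        have hflt : List.filter (fun q => decide (q ∈ af.erase p)) Q
            = List.filter (fun q => decide (q ∈ af)) Q :=
          List.filter_congr (fun q hq => by
            have hqp : q ≠ p := fun h => hpQ (h ▸ hq)
            simp [List.mem_erase_of_ne hqp])
        rw [hflt]
        simp
      · -- second component
        rw [haf.erase_eq_filter p, List.filter_filter]
        exact List.filter_congr (fun x _ => by
          by_cases hxp : x = p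
          · simp [hxp]
          · have hb : (x == p) = false := beq_eq_false_iff_ne.mpr hxp
            simp [List.mem_cons, bne, hb, hxp, Bool.and_comm])
    · have hc : af.contains p = false := by simpa [List.contains_iff_mem] using hp
      simp only [List.foldl_cons, hc, Bool.false_eq_true, if_false]
      rw [ih sf af hQ' haf]
      simp only [Prod.mk.injEq]
      constructor
      · rw [List.filter_cons]
        simp [hp]
      · exact List.filter_congr (fun x hx => by
          have hxp : x ≠ p := fun h => hp (h ▸ hx)
          simp [List.mem_cons, hxp])

lemma pvRk_of_mem (f : String) (hf : f ∈ pvPriorityOrder) : pvRk f < 11 := by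
  fin_cases hf <;> decide

lemma pvRk_of_not_mem (f : String) (hf : f ∉ pvPriorityOrder) : pvRk f = 11 := by
  simp only [pvPriorityOrder, List.mem_cons, not_or, List.not_mem_nil] at hf
  obtain ⟨h1, h2, h3, h4, h5, h6, h7, h8, h9, h10, h11, -⟩ := hf
  have hd : pvRankDict.items =
      [("CRITICAL_FINANCIAL_IMPACT", (0 : Int)), ("HIGH_FINANCIAL_IMPACT", 1),
       ("UNLIMITED_APPROVAL", 2), ("BEHAVIORAL_ANOMALY", 3), ("REPUTATION_RISK", 4),
       ("HIGH_ANOMALY_SCORE", 5), ("MEDIUM_FINANCIAL_IMPACT", 6), ("LARGE_APPROVAL", 7),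
       ("MEDIUM_ANOMALY_SCORE", 8), ("LOW_FINANCIAL_IMPACT", 9), ("LOW_ANOMALY_SCORE", 10)] := by
    decide
  simp [pvRk, PySem.Dict.getD, PySem.Dict.get?, hd, beq_iff_eq,
    pvPriorityOrder, Ne.symm h1, Ne.symm h2, Ne.symm h3, Ne.symm h4, Ne.symm h5, Ne.symm h6,
    Ne.symm h7, Ne.symm h8, Ne.symm h9, Ne.symm h10, Ne.symm h11]

lemma pvP_pairwise : List.Pairwise (fun a b => pvKey a < pvKey b) pvPriorityOrder := by
  decide

lemma pvP_nodup : pvPriorityOrder.Nodup := by decide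

-- the canonical result both programs produce
lemma pvMain (basic_factors enhanced_factors : List String) :
    merge_risk_factors_py basic_factors enhanced_factors
      = merge_risk_factors_py_alt basic_factors enhanced_factors := by
  set S := PySem.Set.ofList (basic_factors ++ enhanced_factors) with hS
  have hSnd : S.Nodup := PySem.Set.nodup_ofList _
  set ys := pvPriorityOrder.filter (fun p => decide (p ∈ S))
      ++ PySem.List.sorted (S.filter (fun x => decide (x ∉ pvPriorityOrder))) (fun x => x) false
      with hys
  -- A computes ys
  have hA : merge_risk_factors_py basic_factors enhanced_factors = ys := by
    have h := pvFoldA pvPriorityOrder [] S pvP_nodup hSnd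
    show ((pvPriorityOrder.foldl
        (fun st p => if st.2.contains p then (st.1 ++ [p], (PySem.List.remove? st.2 p).getD st.2) else st)
        ((([] : List String), S) : List String × List String)).1
      ++ PySem.List.sorted ((pvPriorityOrder.foldl
        (fun st p => if st.2.contains p then (st.1 ++ [p], (PySem.List.remove? st.2 p).getD st.2) else st)
        ((([] : List String), S) : List String × List String)).2) (fun x => x) false) = ys
    rw [h]
    simp [hys]
  -- B is a lexicographic sort of S
  have hB : merge_risk_factors_py_alt basic_factors enhanced_factors
      = PySem.List.sorted S pvKey false := by
    unfold merge_risk_factors_py_alt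
    rw [← hS, pvSorted2_eq_sorted]
    rfl
  -- ys is a permutation of S
  have hperm : ys.Perm S := by
    have h1 : (pvPriorityOrder.filter (fun p => decide (p ∈ S))).Perm
        (S.filter (fun x => decide (x ∈ pvPriorityOrder))) := by
      apply List.perm_of_nodup_nodup_toFinset_eq (pvP_nodup.filter _) (hSnd.filter _)
      ext x
      simp [and_comm]
    have h2 : ((S.filter (fun x => decide (x ∈ pvPriorityOrder)))
        ++ S.filter (fun x => decide (x ∉ pvPriorityOrder))).Perm S := by
      have := List.filter_append_perm (fun x => decide (x ∈ pvPriorityOrder)) S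
      simpa using this
    exact (List.Perm.append h1 (PySem.List.sorted_perm _ _ _)).trans h2
  -- ys is strictly increasing for B's key
  have hpair : List.Pairwise (fun a b => pvKey a < pvKey b) ys := by
    rw [hys, List.pairwise_append]
    refine ⟨List.Pairwise.sublist List.filter_sublist pvP_pairwise, ?_, ?_⟩
    · -- the alphabetical tail: equal ranks, strictly increasing names
      have hnd : (PySem.List.sorted (S.filter (fun x => decide (x ∉ pvPriorityOrder))) (fun x => x) false).Nodup :=
        (PySem.List.sorted_perm _ _ _).nodup_iff.mpr (hSnd.filter _)
      have hle := PySem.List.sorted_pairwise (S.filter (fun x => decide (x ∉ pvPriorityOrder))) (fun x => x)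
      refine ((hle.and hnd).imp_of_mem ?_)
      intro a b ha hb h
      have hna : a ∉ pvPriorityOrder := by
        have := (PySem.List.sorted_perm _ _ _).mem_iff.mp ha
        simpa using (List.mem_filter.mp this).2
      have hnb : b ∉ pvPriorityOrder := by
        have := (PySem.List.sorted_perm _ _ _).mem_iff.mp hb
        simpa using (List.mem_filter.mp this).2
      have : a < b := lt_of_le_of_ne h.1 h.2
      simp [pvKey, Prod.Lex.lt_iff, pvRk_of_not_mem a hna, pvRk_of_not_mem b hnb, this]
    · -- priority factors come before everything unranked
      intro a ha b hb
      have hma : a ∈ pvPriorityOrder := List.mem_of_mem_filter ha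
      have hnb : b ∉ pvPriorityOrder := by
        have := (PySem.List.sorted_perm _ _ _).mem_iff.mp hb
        simpa using (List.mem_filter.mp this).2
      have h1 : pvRk a < 11 := pvRk_of_mem a hma
      have h2 : pvRk b = 11 := pvRk_of_not_mem b hnb
      simp [pvKey, Prod.Lex.lt_iff]
      omega
  rw [hA, hB]
  exact (PySem.List.sorted_eq_of_perm_of_pairwise_lt S ys pvKey hperm hpair).symm

-- ===== VERDICT (by name: the statement is the Claim_ definition above) =====
theorem merge_risk_factors_py_spec : Claim_equal_merge_risk_factors_py := by
  intro basic_factors enhanced_factors _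
  unfold Spec_merge_risk_factors_py
  exact pvMain basic_factors enhanced_factors
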